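-- pv_equiv track=rewrite | github.com/xmarre/ComfyUI-GPU-Resident-Loader | patches.py | infer_unet_prefix_from_keys
-- ===== SOURCE A (Python) =====
-- _UNET_PREFIX_CANDIDATES = ("model.diffusion_model.", "model.model.", "net.")
--
-- def infer_unet_prefix_from_keys(keys: list[str] | tuple[str, ...]) -> str:
--     counts = {candidate: 0 for candidate in _UNET_PREFIX_CANDIDATES}
--     for key in keys:
--         for candidate in _UNET_PREFIX_CANDIDATES:
--             if key.startswith(candidate):
--                 counts[candidate] += 1
--                 break
--     top = max(counts, key=counts.get)
--     return top if counts[top] > 5 else "model."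
-- ===== SOURCE B (Python) =====
-- _UNET_PREFIX_CANDIDATES = ("model.diffusion_model.", "model.model.", "net.")
--
-- def infer_unet_prefix_from_keys(keys):
--     # The three candidate prefixes are mutually exclusive, so count each with
--     # its own full scan, then pick the winner with an explicit comparison chain.
--     c1 = sum(k.startswith("model.diffusion_model.") for k in keys)
--     c2 = sum(k.startswith("model.model.") for k in keys)
--     c3 = sum(k.startswith("net.") for k in keys)
--     best, n = "model.diffusion_model.", c1
--     if c2 > n:
--         best, n = "model.model.", c2
--     if c3 > n:
--         best, n = "net.", c3
--     return best if n > 5 else "model."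
-- ===== Notes on version B (the rewrite author's own statement) =====
-- stated objective: alternative
-- what changed: Replaced the single key-pass that updates a candidate-keyed dict with an inner break loop, plus max(counts, key=counts.get), by three independent full scans (one count per candidate, valid because the prefixes are mutually exclusive) followed by an explicit comparison chain that keeps the earlier candidate on ties.
import Mathlib
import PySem

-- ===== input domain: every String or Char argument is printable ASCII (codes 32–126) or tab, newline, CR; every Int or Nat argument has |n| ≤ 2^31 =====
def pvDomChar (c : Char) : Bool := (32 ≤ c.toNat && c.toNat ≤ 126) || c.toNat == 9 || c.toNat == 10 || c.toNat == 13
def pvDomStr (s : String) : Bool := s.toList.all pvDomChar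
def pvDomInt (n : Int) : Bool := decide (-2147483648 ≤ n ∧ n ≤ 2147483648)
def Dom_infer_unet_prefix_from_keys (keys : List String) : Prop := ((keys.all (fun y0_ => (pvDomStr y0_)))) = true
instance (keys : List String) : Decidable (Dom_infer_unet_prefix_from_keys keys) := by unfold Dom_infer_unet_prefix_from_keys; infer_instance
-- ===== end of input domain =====

-- B replaces A's single dict-updating pass (inner loop with break) and max(counts, key=...)
-- by three independent per-candidate counts and an explicit comparison chain (objective: alternative).

-- ===== PORT A =====
def pvCandidates : List String := ["model.diffusion_model.", "model.model.", "net."]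

-- the inner 'for candidate in _UNET_PREFIX_CANDIDATES: if …: counts[candidate] += 1; break'
def pvInnerLoop (counts : PySem.Dict String Int) (key : String) : List String → PySem.Dict String Int
  | [] => counts
  | c :: rest =>
    if PySem.Str.startswith key c then
      PySem.Dict.insert counts c (PySem.Dict.getD counts c 0 + 1)
    else pvInnerLoop counts key rest

def infer_unet_prefix_from_keys (keys : List String) : String :=
  let counts0 : PySem.Dict String Int := pvCandidates.foldl (fun d c => PySem.Dict.insert d c 0) ⟨[]⟩
  let counts := keys.foldl (fun d key => pvInnerLoop d key pvCandidates) counts0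
  let top := PySem.List.maxD (PySem.Dict.keys counts) (fun k => PySem.Dict.getD counts k 0) "model."
  if PySem.Dict.getD counts top 0 > 5 then top else "model."

-- ===== PORT B =====
def infer_unet_prefix_from_keys_alt (keys : List String) : String :=
  let c1 := keys.countP (fun k => PySem.Str.startswith k "model.diffusion_model.")
  let c2 := keys.countP (fun k => PySem.Str.startswith k "model.model.")
  let c3 := keys.countP (fun k => PySem.Str.startswith k "net.")
  let bn : String × Nat := ("model.diffusion_model.", c1)
  let bn := if c2 > bn.2 then (("model.model." : String), c2) else bn
  let bn := if c3 > bn.2 then (("net." : String), c3) else bn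
  if bn.2 > 5 then bn.1 else "model."

-- ===== PRECONDITION & SPEC =====
def Spec_infer_unet_prefix_from_keys (keys : List String) (out : String) : Prop := out = infer_unet_prefix_from_keys_alt keys
instance (keys : List String) (out : String) : Decidable (Spec_infer_unet_prefix_from_keys keys out) := by unfold Spec_infer_unet_prefix_from_keys; infer_instance

-- ===== CLAIM (what is proved, stated in full; the proofs are below) =====
def Claim_equal_infer_unet_prefix_from_keys : Prop := ∀ (keys : List String), Dom_infer_unet_prefix_from_keys keys → Spec_infer_unet_prefix_from_keys keys (infer_unet_prefix_from_keys keys)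

-- ===== LEMMAS AND PROOFS =====

-- the three candidate prefixes are mutually exclusive
theorem pv_excl12 (k : String) (h : PySem.Str.startswith k "model.diffusion_model." = true) :
    PySem.Str.startswith k "model.model." = false := by
  by_contra hc
  rw [Bool.not_eq_false] at hc
  simp only [PySem.Str.startswith, PySem.Chars.startswith, List.isPrefixOf_iff_prefix] at h hc
  rcases List.prefix_or_prefix_of_prefix h hc with h2 | h2 <;> revert h2 <;> decide

theorem pv_excl13 (k : String) (h : PySem.Str.startswith k "model.diffusion_model." = true) :
    PySem.Str.startswith k "net." = false := by
  by_contra hc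
  rw [Bool.not_eq_false] at hc
  simp only [PySem.Str.startswith, PySem.Chars.startswith, List.isPrefixOf_iff_prefix] at h hc
  rcases List.prefix_or_prefix_of_prefix h hc with h2 | h2 <;> revert h2 <;> decide

theorem pv_excl23 (k : String) (h : PySem.Str.startswith k "model.model." = true) :
    PySem.Str.startswith k "net." = false := by
  by_contra hc
  rw [Bool.not_eq_false] at hc
  simp only [PySem.Str.startswith, PySem.Chars.startswith, List.isPrefixOf_iff_prefix] at h hc
  rcases List.prefix_or_prefix_of_prefix h hc with h2 | h2 <;> revert h2 <;> decide

theorem pv_loop_eq : ∀ (keys : List String) (a b c : Int),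
    keys.foldl (fun d key => pvInnerLoop d key pvCandidates)
      ⟨[("model.diffusion_model.", a), ("model.model.", b), ("net.", c)]⟩
    = ⟨[("model.diffusion_model.", a + (keys.countP (fun k => PySem.Str.startswith k "model.diffusion_model.") : Int)),
        ("model.model.", b + (keys.countP (fun k => PySem.Str.startswith k "model.model.") : Int)),
        ("net.", c + (keys.countP (fun k => PySem.Str.startswith k "net.") : Int))]⟩ := by
  intro keys
  induction keys with
  | nil => intro a b c; simp [List.countP]
  | cons k keys ih =>
    intro a b c
    rw [List.foldl_cons]
    by_cases h1 : PySem.Str.startswith k "model.diffusion_model." = true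
    · have e2 := pv_excl12 k h1; have e3 := pv_excl13 k h1
      simp at h1 e2 e3
      have hstep : pvInnerLoop ⟨[("model.diffusion_model.", a), ("model.model.", b), ("net.", c)]⟩ k pvCandidates
          = ⟨[("model.diffusion_model.", a + 1), ("model.model.", b), ("net.", c)]⟩ := by
        simp [pvInnerLoop, pvCandidates, h1, PySem.Dict.insert, PySem.Dict.contains,
          PySem.Dict.getD, PySem.Dict.get?]
      rw [hstep, ih]
      simp [h1, e2, e3]
      omega
    · by_cases h2 : PySem.Str.startswith k "model.model." = true
      · have e3 := pv_excl23 k h2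
        simp at h1 h2 e3
        have hstep : pvInnerLoop ⟨[("model.diffusion_model.", a), ("model.model.", b), ("net.", c)]⟩ k pvCandidates
            = ⟨[("model.diffusion_model.", a), ("model.model.", b + 1), ("net.", c)]⟩ := by
          simp [pvInnerLoop, pvCandidates, h1, h2, PySem.Dict.insert, PySem.Dict.contains,
            PySem.Dict.getD, PySem.Dict.get?]
        rw [hstep, ih]
        simp [h1, h2, e3]
        omega
      · by_cases h3 : PySem.Str.startswith k "net." = true
        · simp at h1 h2 h3
          have hstep : pvInnerLoop ⟨[("model.diffusion_model.", a), ("model.model.", b), ("net.", c)]⟩ k pvCandidates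
              = ⟨[("model.diffusion_model.", a), ("model.model.", b), ("net.", c + 1)]⟩ := by
            simp [pvInnerLoop, pvCandidates, h1, h2, h3, PySem.Dict.insert, PySem.Dict.contains,
              PySem.Dict.getD, PySem.Dict.get?]
          rw [hstep, ih]
          simp [h1, h2, h3]
          omega
        · simp at h1 h2 h3
          have hstep : pvInnerLoop ⟨[("model.diffusion_model.", a), ("model.model.", b), ("net.", c)]⟩ k pvCandidates
              = ⟨[("model.diffusion_model.", a), ("model.model.", b), ("net.", c)]⟩ := by
            simp [pvInnerLoop, pvCandidates, h1, h2, h3]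
          rw [hstep, ih]
          simp [h1, h2, h3]

def pvFinish (counts : PySem.Dict String Int) : String :=
  let top := PySem.List.maxD (PySem.Dict.keys counts) (fun k => PySem.Dict.getD counts k 0) "model."
  if PySem.Dict.getD counts top 0 > 5 then top else "model."

theorem infer_unet_prefix_from_keys_spec : Claim_equal_infer_unet_prefix_from_keys := by
  intro keys _
  unfold Spec_infer_unet_prefix_from_keys
  have hA : infer_unet_prefix_from_keys keys
      = pvFinish (List.foldl (fun d key => pvInnerLoop d key pvCandidates)
          ⟨[("model.diffusion_model.", 0), ("model.model.", 0), ("net.", 0)]⟩ keys) := rfl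
  rw [hA, pv_loop_eq]
  rw [infer_unet_prefix_from_keys_alt]
  simp only [pvFinish, zero_add]
  generalize (keys.countP (fun k => PySem.Str.startswith k "model.diffusion_model.")) = n1
  generalize (keys.countP (fun k => PySem.Str.startswith k "model.model.")) = n2
  generalize (keys.countP (fun k => PySem.Str.startswith k "net.")) = n3
  simp only [PySem.List.maxD, PySem.List.max?, PySem.Dict.keys, PySem.Dict.getD,
    PySem.Dict.get?, List.map, List.foldl, List.find?, Option.map, Option.getD]
  norm_num
  split_ifs <;> simp_all <;> rw [if_neg (by omega)]
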